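-- pv_equiv track=rewrite | github.com/andypymont/adventofcode | 2017/day06.py | redistribution_cycles_until_repeat
-- ===== SOURCE A (Python) =====
-- from typing import Sequence, Tuple
--
-- def largest_block(blocks: Sequence[int]) -> int:
--     largest_size = max(blocks)
--     return next(block for block, size in enumerate(blocks) if size == largest_size)
--
-- def redistribute_from_largest(blocks: Sequence[int]) -> Sequence[int]:
--     blocks = list(blocks)
--     source = largest_block(blocks)
--     redist = blocks[source]
--     blocks[source] = 0
--     bank = source + 1
--     while redist > 0:
--         blocks[bank % len(blocks)] += 1
--         redist -= 1
--         bank += 1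
--     return tuple(blocks)
--
-- def redistribution_cycles_until_repeat(blocks: Sequence[int]) -> Tuple[int, int]:
--     seen = set()
--
--     cycles1 = 0
--     while blocks not in seen:
--         seen.add(blocks)
--         blocks = redistribute_from_largest(blocks)
--         cycles1 += 1
--
--     seeking = blocks
--     cycles2 = 0
--     while (blocks != seeking) or (cycles2 == 0):
--         blocks = redistribute_from_largest(blocks)
--         cycles2 += 1
--
--     return cycles1, cycles2
-- ===== SOURCE B (Python) =====
-- def _redistribute(blocks):
--     n = len(blocks)
--     m = max(blocks)
--     src = blocks.index(m)
--     out = list(blocks)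
--     out[src] = 0
--     if m > 0:
--         q, r = divmod(m, n)
--         if q:
--             out = [v + q for v in out]
--         stop = src + 1 + r
--         for i in range(src + 1, min(stop, n)):
--             out[i] += 1
--         for i in range(stop - n):
--             out[i] += 1
--     return tuple(out)
--
-- def redistribution_cycles_until_repeat(blocks):
--     seen = set()
--     cycles1 = 0
--     while blocks not in seen:
--         seen.add(blocks)
--         blocks = _redistribute(blocks)
--         cycles1 += 1
--     seeking = blocks
--     cycles2 = 0
--     while (blocks != seeking) or (cycles2 == 0):
--         blocks = _redistribute(blocks)
--         cycles2 += 1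
--     return cycles1, cycles2
-- ===== Notes on version B (the rewrite author's own statement) =====
-- stated objective: alternative
-- what changed: B computes each redistribution step in bulk - divmod gives every bank's full-cycle share at once and the remainder goes to at most two contiguous index ranges - instead of A's inner loop handing out the largest block one unit (with a modulo) at a time; per step this is O(n) arithmetic rather than O(n+maxblock) unit increments.
import Mathlib
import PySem

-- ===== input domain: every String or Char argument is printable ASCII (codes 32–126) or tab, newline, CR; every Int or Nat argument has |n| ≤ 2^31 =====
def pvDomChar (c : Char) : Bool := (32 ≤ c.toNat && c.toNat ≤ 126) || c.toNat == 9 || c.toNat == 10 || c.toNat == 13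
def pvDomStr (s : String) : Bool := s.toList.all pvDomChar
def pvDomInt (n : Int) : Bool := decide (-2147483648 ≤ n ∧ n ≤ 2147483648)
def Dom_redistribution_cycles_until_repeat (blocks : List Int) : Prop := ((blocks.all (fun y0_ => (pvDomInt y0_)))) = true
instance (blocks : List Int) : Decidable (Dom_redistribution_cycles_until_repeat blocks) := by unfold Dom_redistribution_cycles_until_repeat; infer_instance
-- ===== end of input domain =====

-- B replaces A's unit-by-unit redistribution loop by a bulk divmod step: every bank's
-- full-cycle share at once, the remainder going to at most two contiguous index ranges
-- (objective: alternative algorithm for the redistribution step).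

-- fuel bound shared by both ports: strictly more than the number of distinct reachable
-- states, so the repeat-detection loops (which Python runs unboundedly) always finish
-- before it runs out; it only makes the recursions total.
def pvFuel (blocks : List Int) : Nat :=
  let lo := blocks.foldl (fun a e => min a e) 0
  let hi := blocks.foldl (fun a e => a + max e 0) 0
  ((hi - lo + 1).toNat + 2) ^ blocks.length + 2

-- ===== PORT A =====
-- largest_block: max then first index with that size (next(... enumerate ...) = first match)
def pvLargestBlock (blocks : List Int) : Option Nat :=
  match PySem.List.max? blocks (fun x => x) with
  | none => none                               -- max of empty raises ValueError (excluded by Pre_)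
  | some m => PySem.List.index? blocks m

-- the `while redist > 0` unit-distribution loop of redistribute_from_largest
def pvIncrLoop (blocks : List Int) (redist bank : Int) : List Int :=
  if 0 < redist then
    pvIncrLoop (blocks.modify (PySem.Int.mod bank (PySem.List.len blocks)).toNat (· + 1))
      (redist - 1) (bank + 1)
  else blocks
termination_by redist.toNat
decreasing_by omega

def pvRedistributeFromLargest (blocks : List Int) : List Int :=
  match pvLargestBlock blocks with
  | none => blocks                             -- unreachable under Pre_
  | some source =>
    let redist := blocks.getD source 0
    let blocks' := blocks.set source 0
    pvIncrLoop blocks' redist ((source : Int) + 1)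

-- `while blocks not in seen: …`
def pvSeenLoop (fuel : Nat) (seen : PySem.Set (List Int)) (blocks : List Int) (cycles1 : Int) :
    List Int × Int :=
  match fuel with
  | 0 => (blocks, cycles1)
  | f + 1 =>
    if PySem.Set.contains seen blocks then (blocks, cycles1)
    else pvSeenLoop f (PySem.Set.add seen blocks) (pvRedistributeFromLargest blocks) (cycles1 + 1)

-- `while (blocks != seeking) or (cycles2 == 0): …`
def pvSeekLoop (fuel : Nat) (seeking blocks : List Int) (cycles2 : Int) : Int :=
  match fuel with
  | 0 => cycles2
  | f + 1 =>
    if blocks ≠ seeking ∨ cycles2 = 0 then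
      pvSeekLoop f seeking (pvRedistributeFromLargest blocks) (cycles2 + 1)
    else cycles2

def redistribution_cycles_until_repeat (blocks : List Int) : Int × Int :=
  let p := pvSeenLoop (pvFuel blocks) PySem.Set.empty blocks 0
  (p.2, pvSeekLoop (pvFuel blocks) p.1 p.1 0)

-- ===== PORT B =====
-- _redistribute of Source B: divmod gives every bank's bulk share at once; the r remainder
-- units go to the (at most two) contiguous index ranges after the source
def pvRedistAlt (blocks : List Int) : List Int :=
  match PySem.List.max? blocks (fun x => x) with
  | none => blocks                             -- max of empty raises ValueError (excluded by Pre_)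
  | some m =>
    match PySem.List.index? blocks m with
    | none => blocks                           -- unreachable: the max is a member
    | some src =>
      let n : Int := PySem.List.len blocks
      let out := blocks.set src 0
      if 0 < m then
        let q := PySem.Int.floordiv m n
        let r := PySem.Int.mod m n
        let stop := (src : Int) + 1 + r
        let out1 := if q ≠ 0 then out.map (fun v => v + q) else out
        let out2 := (PySem.List.pyRange ((src : Int) + 1) (min stop n) 1).foldl
            (fun acc i => acc.modify i.toNat (· + 1)) out1
        (PySem.List.pyRange 0 (stop - n) 1).foldl
            (fun acc i => acc.modify i.toNat (· + 1)) out2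
      else out

def pvSeenLoopAlt (fuel : Nat) (seen : PySem.Set (List Int)) (blocks : List Int) (cycles1 : Int) :
    List Int × Int :=
  match fuel with
  | 0 => (blocks, cycles1)
  | f + 1 =>
    if PySem.Set.contains seen blocks then (blocks, cycles1)
    else pvSeenLoopAlt f (PySem.Set.add seen blocks) (pvRedistAlt blocks) (cycles1 + 1)

def pvSeekLoopAlt (fuel : Nat) (seeking blocks : List Int) (cycles2 : Int) : Int :=
  match fuel with
  | 0 => cycles2
  | f + 1 =>
    if blocks ≠ seeking ∨ cycles2 = 0 then
      pvSeekLoopAlt f seeking (pvRedistAlt blocks) (cycles2 + 1)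
    else cycles2

def redistribution_cycles_until_repeat_alt (blocks : List Int) : Int × Int :=
  let p := pvSeenLoopAlt (pvFuel blocks) PySem.Set.empty blocks 0
  (p.2, pvSeekLoopAlt (pvFuel blocks) p.1 p.1 0)

-- ===== PRECONDITION & SPEC =====
-- Pre_ excludes only the empty list, where Python's max of an empty sequence raises ValueError.
def Pre_redistribution_cycles_until_repeat (blocks : List Int) : Prop := blocks ≠ []
instance (blocks : List Int) : Decidable (Pre_redistribution_cycles_until_repeat blocks) := by
  unfold Pre_redistribution_cycles_until_repeat; infer_instance

def pvWitness_redistribution_cycles_until_repeat : List Int := [0, 2, 7, 0]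

def Spec_redistribution_cycles_until_repeat (blocks : List Int) (out : Int × Int) : Prop :=
  out = redistribution_cycles_until_repeat_alt blocks
instance (blocks : List Int) (out : Int × Int) :
    Decidable (Spec_redistribution_cycles_until_repeat blocks out) := by
  unfold Spec_redistribution_cycles_until_repeat; infer_instance

-- ===== CLAIM (what is proved, stated in full; the proofs are below) =====
def Claim_equal_redistribution_cycles_until_repeat : Prop :=
  ∀ (blocks : List Int), Dom_redistribution_cycles_until_repeat blocks →
    Pre_redistribution_cycles_until_repeat blocks →
    Spec_redistribution_cycles_until_repeat blocks (redistribution_cycles_until_repeat blocks)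

-- ===== LEMMAS AND PROOFS =====

-- how many of `redist` round-robin units (starting at `bank`) land on index i, as the
-- same recursion pvIncrLoop performs
def pvCnt (n redist bank : Int) (i : Nat) : Int :=
  if 0 < redist then
    (if (PySem.Int.mod bank n).toNat = i then 1 else 0) + pvCnt n (redist - 1) (bank + 1) i
  else 0
termination_by redist.toNat
decreasing_by omega

theorem pvIncrLoop_length (redist bank : Int) (b : List Int) :
    (pvIncrLoop b redist bank).length = b.length := by
  unfold pvIncrLoop
  split
  · rw [pvIncrLoop_length, List.length_modify]
  · rfl
termination_by redist.toNat
decreasing_by omega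

theorem pvIncrLoop_getElem (redist : Int) (bank : Int) (b : List Int) (hb : 0 < b.length)
    (i : Nat) (hi : i < b.length) :
    (pvIncrLoop b redist bank)[i]'(by rw [pvIncrLoop_length]; exact hi)
      = b[i] + pvCnt (b.length : Int) redist bank i := by
  unfold pvIncrLoop pvCnt
  split
  · have hlen : (b.modify (PySem.Int.mod bank (PySem.List.len b)).toNat (· + 1)).length = b.length :=
      List.length_modify ..
    have := pvIncrLoop_getElem (redist - 1) (bank + 1)
      (b.modify (PySem.Int.mod bank (PySem.List.len b)).toNat (· + 1)) (by omega) i (by omega)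
    simp only [hlen] at this
    rw [this]  -- hmm getElem proof mismatch?
    rw [List.getElem_modify]
    simp only [PySem.List.len_eq] at *
    split_ifs <;> omega
  · simp
termination_by redist.toNat
decreasing_by omega

theorem pv_small_emod (n x : Int) (h1 : -n < x) (h2 : x < n) :
    x % n = if 0 ≤ x then x else x + n := by
  split_ifs with h
  · exact Int.emod_eq_of_lt h h2
  · rw [(Int.add_mul_emod_self_left x n 1).symm, mul_one]
    exact Int.emod_eq_of_lt (by omega) (by omega)

theorem pv_pred_emod (n a : Int) (hn : 0 < n) :
    (a - 1) % n = if a % n = 0 then n - 1 else a % n - 1 := by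
  have h := Int.mul_ediv_add_emod a n
  have h0 := Int.emod_nonneg a (by omega : n ≠ 0)
  have h1 := Int.emod_lt_of_pos a hn
  split_ifs with hz
  · have key : a - 1 = (n - 1) + n * (a / n - 1) := by linarith [mul_sub n (a/n) 1, mul_one n]
    rw [key, Int.add_mul_emod_self_left]
    exact Int.emod_eq_of_lt (by omega) (by omega)
  · have key : a - 1 = (a % n - 1) + n * (a / n) := by linarith
    rw [key, Int.add_mul_emod_self_left]
    exact Int.emod_eq_of_lt (by omega) (by omega)

theorem pv_pred_ediv (n a : Int) (hn : 0 < n) :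
    (a - 1) / n = if a % n = 0 then a / n - 1 else a / n := by
  have h := Int.mul_ediv_add_emod a n
  have h0 := Int.emod_nonneg a (by omega : n ≠ 0)
  have h1 := Int.emod_lt_of_pos a hn
  split_ifs with hz
  · have key : a - 1 = (n - 1) + n * (a / n - 1) := by linarith [mul_sub n (a/n) 1, mul_one n]
    rw [key, Int.add_mul_ediv_left _ _ (by omega : n ≠ 0),
      Int.ediv_eq_zero_of_lt (by omega) (by omega), zero_add]
  · have key : a - 1 = (a % n - 1) + n * (a / n) := by linarith
    rw [key, Int.add_mul_ediv_left _ _ (by omega : n ≠ 0),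
      Int.ediv_eq_zero_of_lt (by omega) (by omega), zero_add]

theorem pvCnt_closed (n : Int) (hn : 0 < n) (redist : Int) (hr : 0 ≤ redist) (bank : Int)
    (i : Nat) (hi : (i : Int) < n) :
    pvCnt n redist bank i
      = redist / n + (if ((i : Int) - bank) % n < redist % n then 1 else 0) := by
  by_cases hpos : 0 < redist
  · have IH := pvCnt_closed n hn (redist - 1) (by omega) (bank + 1) i hi
    unfold pvCnt
    rw [if_pos hpos, IH, PySem.Int.mod_eq_emod_of_pos hn]
    have e1 : (i : Int) - (bank + 1) = ((i : Int) - bank) - 1 := by ring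
    rw [e1, pv_pred_emod n ((i : Int) - bank) hn, pv_pred_ediv n redist hn,
      pv_pred_emod n redist hn]
    have hm0 := Int.emod_nonneg bank (by omega : n ≠ 0)
    have hm1 := Int.emod_lt_of_pos bank hn
    have hr0 := Int.emod_nonneg redist (by omega : n ≠ 0)
    have hr1 := Int.emod_lt_of_pos redist hn
    have hd0 := Int.emod_nonneg ((i : Int) - bank) (by omega : n ≠ 0)
    have hd1 := Int.emod_lt_of_pos ((i : Int) - bank) hn
    have hie : (i : Int) % n = (i : Int) := Int.emod_eq_of_lt (by positivity) hi
    have hmd : ((i : Int) - bank) % n = ((i : Int) - bank % n) % n := by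
      rw [Int.sub_emod, hie]
    have hd : ((i : Int) - bank) % n
        = if 0 ≤ (i : Int) - bank % n then (i : Int) - bank % n else (i : Int) - bank % n + n := by
      rw [hmd]; exact pv_small_emod n _ (by omega) (by omega)
    rw [hd]
    split_ifs <;> omega
  · have hz : redist = 0 := by omega
    subst hz
    unfold pvCnt
    rw [if_neg hpos, Int.zero_emod, Int.zero_ediv,
      if_neg (by exact not_lt.2 (Int.emod_nonneg _ (by omega : n ≠ 0)))]
    omega
termination_by redist.toNat
decreasing_by omega

theorem foldl_inc_length (r : List Int) (l : List Int) :
    (r.foldl (fun acc i => acc.modify i.toNat (· + 1)) l).length = l.length := by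
  induction r generalizing l with
  | nil => rfl
  | cons x t ih => simp [List.foldl, ih, List.length_modify]

theorem foldl_inc_getElem (b a : Int) (xs : List Int) (ha : 0 ≤ a)
    (hb : b ≤ (xs.length : Int)) (j : Nat) (hj : j < xs.length) :
    ((PySem.List.pyRange a b 1).foldl (fun acc i => acc.modify i.toNat (· + 1)) xs)[j]'(by
        rw [foldl_inc_length]; exact hj)
      = xs[j] + (if a ≤ (j : Int) ∧ (j : Int) < b then 1 else 0) := by
  by_cases hab : b ≤ a
  · rw [PySem.List.pyRange_one_eq_nil hab]
    simp only [List.foldl_nil]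
    rw [if_neg (by omega)]
    omega
  · rw [PySem.List.pyRange_one_cons (by omega)]
    simp only [List.foldl_cons]
    have IH := foldl_inc_getElem b (a + 1) (xs.modify a.toNat (· + 1)) (by omega)
      (by rw [List.length_modify]; omega) j (by rw [List.length_modify]; omega)
    rw [IH, List.getElem_modify]
    split_ifs <;> omega
termination_by (b - a).toNat
decreasing_by omega

theorem pvRedist_eq (blocks : List Int) : pvRedistributeFromLargest blocks = pvRedistAlt blocks := by
  unfold pvRedistributeFromLargest pvLargestBlock pvRedistAlt
  cases hmax : PySem.List.max? blocks (fun x => x) with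
  | none => rfl
  | some m =>
    cases hidx : PySem.List.index? blocks m with
    | none => simp only [hidx]
    | some src =>
      simp only [hidx, PySem.List.len_eq]
      obtain ⟨hsrc, hval, _⟩ := PySem.List.getElem_of_index?_eq_some hidx
      have hlen : 0 < blocks.length := by omega
      have hn : (0 : Int) < (blocks.length : Int) := by exact_mod_cast hlen
      rw [List.getD_eq_getElem blocks 0 hsrc]
      by_cases hm : 0 < m
      · rw [if_pos hm]
        have hr0 := PySem.Int.mod_nonneg m hn
        have hr1 := PySem.Int.mod_lt m hn
        have hsn : (src : Int) < (blocks.length : Int) := by exact_mod_cast hsrc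
        apply List.ext_getElem
        · rw [pvIncrLoop_length, List.length_set, foldl_inc_length, foldl_inc_length]
          split_ifs <;> simp [List.length_map, List.length_set]
        · intro i hi1 hi2
          have hib : i < blocks.length := by
            simpa [pvIncrLoop_length, List.length_set] using hi1
          rw [pvIncrLoop_getElem _ _ _ (by simpa [List.length_set] using hlen) i
              (by simpa [List.length_set] using hib)]
          simp only [List.length_set]
          rw [pvCnt_closed (blocks.length : Int) hn (blocks[src]) (by omega) ((src : Int) + 1) i
              (by exact_mod_cast hib), hval]
          have e1 : (i : Int) - ((src : Int) + 1) = (i : Int) - src - 1 := by ring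
          rw [e1]
          have h2 : min ((src : Int) + 1 + PySem.Int.mod m (blocks.length : Int))
              (blocks.length : Int) ≤ (blocks.length : Int) := by omega
          rw [foldl_inc_getElem _ 0 _ le_rfl
              (by rw [foldl_inc_length]; split_ifs <;> simp [List.length_map, List.length_set] <;> omega)
              i (by rw [foldl_inc_length]; split_ifs <;> simpa [List.length_map, List.length_set])]
          rw [foldl_inc_getElem _ ((src : Int) + 1) _ (by omega)
              (by split_ifs <;> simp only [List.length_map, List.length_set] <;> omega)
              i (by split_ifs <;> simpa [List.length_map, List.length_set])]
          rw [PySem.Int.floordiv_eq_ediv_of_pos hn, PySem.Int.mod_eq_emod_of_pos hn]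
          have hbase : (if m / (blocks.length : Int) ≠ 0
                then (blocks.set src 0).map (fun v => v + m / (blocks.length : Int))
                else blocks.set src 0)[i]'(by split_ifs <;> simp [List.length_set] <;> omega)
              = (blocks.set src 0)[i]'(by simpa [List.length_set] using hib)
                + m / (blocks.length : Int) := by
            split_ifs with hq
            · rw [List.getElem_map]
            · omega
          rw [hbase, List.getElem_set]
          have hr0' := Int.emod_nonneg m (by omega : (blocks.length : Int) ≠ 0)
          have hr1' := Int.emod_lt_of_pos m hn
          by_cases hxn : (i : Int) - src - 1 = -(blocks.length : Int)
          · have hz : ((i : Int) - src - 1) % (blocks.length : Int) = 0 := by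
              rw [hxn]
              simp
            rw [hz]
            split_ifs <;> omega
          · rw [pv_small_emod (blocks.length : Int) ((i : Int) - src - 1) (by omega)
                (by omega)]
            split_ifs <;> omega
      · rw [if_neg hm]
        unfold pvIncrLoop
        rw [if_neg (by rw [hval]; omega)]

theorem pvSeenLoop_eq (fuel : Nat) (seen : PySem.Set (List Int)) (blocks : List Int) (c : Int) :
    pvSeenLoop fuel seen blocks c = pvSeenLoopAlt fuel seen blocks c := by
  induction fuel generalizing seen blocks c with
  | zero => rfl
  | succ f ih =>
    simp only [pvSeenLoop, pvSeenLoopAlt, pvRedist_eq]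
    split <;> simp [ih]

theorem pvSeekLoop_eq (fuel : Nat) (seeking blocks : List Int) (c : Int) :
    pvSeekLoop fuel seeking blocks c = pvSeekLoopAlt fuel seeking blocks c := by
  induction fuel generalizing blocks c with
  | zero => rfl
  | succ f ih =>
    simp only [pvSeekLoop, pvSeekLoopAlt, pvRedist_eq]
    split <;> simp [ih]

-- ===== VERDICT (by name: the statement is the Claim_ definition above) =====
theorem redistribution_cycles_until_repeat_spec : Claim_equal_redistribution_cycles_until_repeat := by
  intro blocks _ _
  unfold Spec_redistribution_cycles_until_repeat
  unfold redistribution_cycles_until_repeat redistribution_cycles_until_repeat_alt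
  simp only [pvSeenLoop_eq, pvSeekLoop_eq]
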